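-- pv_equiv track=rewrite | github.com/Grego22/Katas | Python/7-kyu/Parts_of_a_List/Solutions.py | partlist
-- ===== SOURCE A (Python) =====
-- def partlist(arr):
--     if len(arr) <= 1:
--         return []
--
--     result = []
--
--     s = ' '.join(arr)
--     j = len(arr[0])
--     for i in range(1, len(arr)):
--         result.append((s[:j], s[j + 1:]))
--         j += 1 + len(arr[i])
--
--     return result
-- ===== SOURCE B (Python) =====
-- def partlist(arr):
--     if len(arr) <= 1:
--         return []
--     return [(' '.join(arr[:i]), ' '.join(arr[i:])) for i in range(1, len(arr))]
-- ===== Notes on version B (the rewrite author's own statement) =====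
-- stated objective: simpler
-- what changed: Replaced the precomputed full join with offset/index bookkeeping (mutable j, s[:j]/s[j+1:] slicing inside a loop) by a direct list comprehension that joins the prefix and suffix at each split point.
import Mathlib
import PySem

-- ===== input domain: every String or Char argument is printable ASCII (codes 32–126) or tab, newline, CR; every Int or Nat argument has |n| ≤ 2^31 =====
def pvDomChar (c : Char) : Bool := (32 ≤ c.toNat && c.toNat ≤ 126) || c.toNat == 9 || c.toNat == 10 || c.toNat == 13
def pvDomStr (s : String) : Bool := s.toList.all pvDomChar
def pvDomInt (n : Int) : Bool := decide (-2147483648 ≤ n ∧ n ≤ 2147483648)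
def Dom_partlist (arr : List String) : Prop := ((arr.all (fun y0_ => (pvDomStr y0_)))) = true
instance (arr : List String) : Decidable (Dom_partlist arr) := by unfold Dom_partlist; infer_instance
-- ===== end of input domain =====

-- B drops A's precomputed joined string and running offset and simply joins the
-- prefix and suffix at each split point (objective: simpler).

-- ===== PORT A =====
def partlist (arr : List String) : List (String × String) :=
  if PySem.List.len arr ≤ 1 then []
  else
    let s := PySem.Str.join " " arr
    ((PySem.List.pyRange 1 (PySem.List.len arr) 1).foldl
      (fun st i =>
        (st.1 ++ [(PySem.Str.slice s none (some st.2),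
                   PySem.Str.slice s (some (st.2 + 1)) none)],
         st.2 + 1 + PySem.Str.len (PySem.List.pyGetD arr i "")))
      ([], PySem.Str.len (PySem.List.pyGetD arr 0 ""))).1

-- ===== PORT B =====
def partlist_alt (arr : List String) : List (String × String) :=
  if PySem.List.len arr ≤ 1 then []
  else
    (PySem.List.pyRange 1 (PySem.List.len arr) 1).map
      (fun i => (PySem.Str.join " " (PySem.List.slice arr none (some i)),
                 PySem.Str.join " " (PySem.List.slice arr (some i) none)))

-- ===== PRECONDITION & SPEC =====
def Spec_partlist (arr : List String) (out : List (String × String)) : Prop := out = partlist_alt arr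
instance (arr : List String) (out : List (String × String)) : Decidable (Spec_partlist arr out) := by unfold Spec_partlist; infer_instance

-- ===== CLAIM (what is proved, stated in full; the proofs are below) =====
def Claim_equal_partlist : Prop := ∀ (arr : List String), Dom_partlist arr → Spec_partlist arr (partlist arr)

-- ===== LEMMAS AND PROOFS =====

/-- The common description of both ports: successive (prefix-join, suffix-join) pairs. -/
def pvSplits (pre tail : List String) : List (String × String) :=
  match tail with
  | [] => []
  | x :: t => (PySem.Str.join " " pre, PySem.Str.join " " (x :: t)) :: pvSplits (pre ++ [x]) t

lemma pvJoinApp (sep : List Char) (xs ys : List (List Char)) (hx : xs ≠ []) (hy : ys ≠ []) :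
    PySem.Chars.join sep (xs ++ ys) = PySem.Chars.join sep xs ++ sep ++ PySem.Chars.join sep ys := by
  induction xs with
  | nil => exact absurd rfl hx
  | cons x xs ih =>
    cases xs with
    | nil =>
      cases ys with
      | nil => exact absurd rfl hy
      | cons y ys =>
        simp [PySem.Chars.join_cons_cons, PySem.Chars.join_singleton]
    | cons x' xs' =>
      have := ih (by simp)
      simp only [List.cons_append, PySem.Chars.join_cons_cons] at this ⊢
      rw [this]
      simp [List.append_assoc]

/-- toList of the full join, split at a nonempty prefix/suffix boundary. -/
lemma pvJoinSplit (pre tail : List String) (hpre : pre ≠ []) (htail : tail ≠ []) :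
    (PySem.Str.join " " (pre ++ tail)).toList
      = (PySem.Str.join " " pre).toList ++ [' '] ++ (PySem.Str.join " " tail).toList := by
  simp only [PySem.Str.toList_join, List.map_append]
  have : (" " : String).toList = [' '] := rfl
  rw [this, pvJoinApp [' '] _ _ (by simpa using hpre) (by simpa using htail)]

lemma pvSliceTake (s : String) (n : Nat) :
    PySem.Str.slice s none (some (n : Int)) = String.ofList (s.toList.take n) := by
  apply String.toList_inj.mp
  simp [PySem.Str.toList_slice, PySem.List.slice_to_natCast]

lemma pvSliceDrop (s : String) (n : Nat) :
    PySem.Str.slice s (some (n : Int)) none = String.ofList (s.toList.drop n) := by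
  apply String.toList_inj.mp
  simp [PySem.Str.toList_slice, PySem.List.slice_from_natCast]

/-- A's loop, in already-folded form, computes pvSplits. -/
lemma pvAloop (arr : List String) :
    ∀ (tail pre : List String) (acc : List (String × String)), pre ≠ [] → pre ++ tail = arr →
    (tail.foldl
      (fun st x =>
        (st.1 ++ [(PySem.Str.slice (PySem.Str.join " " arr) none (some st.2),
                   PySem.Str.slice (PySem.Str.join " " arr) (some (st.2 + 1)) none)],
         st.2 + 1 + PySem.Str.len x))
      (acc, ((PySem.Str.join " " pre).toList.length : Int))).1
    = acc ++ pvSplits pre tail := by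
  intro tail
  induction tail with
  | nil => intro pre acc _ _; simp [pvSplits]
  | cons x t ih =>
    intro pre acc hpre harr
    have hsplit := pvJoinSplit pre (x :: t) hpre (by simp)
    rw [← harr]
    simp only [List.foldl_cons]
    have h1 : PySem.Str.slice (PySem.Str.join " " (pre ++ x :: t)) none
        (some ((PySem.Str.join " " pre).toList.length : Int)) = PySem.Str.join " " pre := by
      rw [pvSliceTake, hsplit, List.append_assoc, List.take_left, String.ofList_toList]
    have h2 : PySem.Str.slice (PySem.Str.join " " (pre ++ x :: t))
        (some (((PySem.Str.join " " pre).toList.length : Int) + 1)) none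
        = PySem.Str.join " " (x :: t) := by
      have : (((PySem.Str.join " " pre).toList.length : Int) + 1)
          = (((PySem.Str.join " " pre).toList.length + 1 : Nat) : Int) := by push_cast; ring
      rw [this, pvSliceDrop, hsplit]
      have hl : (PySem.Str.join " " pre).toList.length + 1
          = ((PySem.Str.join " " pre).toList ++ [' ']).length := by simp
      rw [List.append_assoc, hl, ← List.append_assoc, List.drop_left, String.ofList_toList]
    have h3 : ((PySem.Str.join " " pre).toList.length : Int) + 1 + PySem.Str.len x
        = ((PySem.Str.join " " (pre ++ [x])).toList.length : Int) := by
      rw [PySem.Str.len_eq, pvJoinSplit pre [x] hpre (by simp)]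
      simp [PySem.Str.toList_join, PySem.Chars.join_singleton]
      ring
    rw [h1, h2, h3, harr]
    rw [ih (pre ++ [x]) _ (by simp) (by simpa using harr)]
    simp [pvSplits]

/-- B's map over split positions computes pvSplits. -/
lemma pvBloop (arr : List String) :
    ∀ (tail pre : List String), pre ≠ [] → pre ++ tail = arr →
    (PySem.List.pyRange (pre.length : Int) (arr.length : Int)).map
      (fun i => (PySem.Str.join " " (PySem.List.slice arr none (some i)),
                 PySem.Str.join " " (PySem.List.slice arr (some i) none)))
    = pvSplits pre tail := by
  intro tail
  induction tail with
  | nil =>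
    intro pre _ harr
    rw [← harr]
    rw [PySem.List.pyRange_one_eq_nil (by simp)]
    simp [pvSplits]
  | cons x t ih =>
    intro pre hpre harr
    have hlen : arr.length = pre.length + (t.length + 1) := by
      rw [← harr]; simp
    rw [PySem.List.pyRange_one_cons (by rw [hlen]; push_cast; omega)]
    simp only [List.map_cons]
    have h1 : PySem.List.slice arr none (some (pre.length : Int)) = pre := by
      rw [PySem.List.slice_to_natCast, ← harr, List.take_left]
    have h2 : PySem.List.slice arr (some (pre.length : Int)) none = x :: t := by
      rw [PySem.List.slice_from_natCast, ← harr, List.drop_left]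
    have h3 : ((pre.length : Int) + 1) = (((pre ++ [x]).length : Nat) : Int) := by
      simp
    rw [h1, h2, h3, ih (pre ++ [x]) (by simp) (by simpa using harr)]
    simp [pvSplits]

-- ===== VERDICT (by name: the statement is the Claim_ definition above) =====
theorem partlist_spec : Claim_equal_partlist := by
  unfold Claim_equal_partlist Spec_partlist
  intro arr _
  unfold partlist partlist_alt
  by_cases h : PySem.List.len arr ≤ 1
  · rw [if_pos h, if_pos h]
  · rw [if_neg h, if_neg h]
    dsimp only
    have hlen : 2 ≤ arr.length := by
      rw [PySem.List.len_eq] at h; omega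
    obtain ⟨a, rest, rfl⟩ : ∃ a rest, arr = a :: rest := by
      cases arr with
      | nil => simp at hlen
      | cons a rest => exact ⟨a, rest, rfl⟩
    rw [PySem.List.foldl_pyRange_pyGetD (a :: rest) ""
      (fun st x =>
        (st.1 ++ [(PySem.Str.slice (PySem.Str.join " " (a :: rest)) none (some st.2),
                   PySem.Str.slice (PySem.Str.join " " (a :: rest)) (some (st.2 + 1)) none)],
         st.2 + 1 + PySem.Str.len x)) _ (by norm_num)]
    have hdrop : List.drop (1 : Int).toNat (a :: rest) = rest := by simp
    have hj0 : PySem.Str.len (PySem.List.pyGetD (a :: rest) 0 "")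
        = ((PySem.Str.join " " [a]).toList.length : Int) := by
      simp [PySem.Str.len_eq, PySem.Str.toList_join, PySem.Chars.join_singleton]
    rw [hdrop, hj0, pvAloop (a :: rest) rest [a] [] (by simp) (by simp)]
    have hb := pvBloop (a :: rest) rest [a] (by simp) (by simp)
    norm_num at hb
    rw [PySem.List.len_eq, ← hb]
    simp
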